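-- pv_equiv track=rewrite | github.com/dlwnstn0524/baekjoon | 취준스터디/3회/네트워크.py | solution
-- ===== SOURCE A (Python) =====
-- def dfs(idx, computers, visited):
--     stack = [idx]
--     while stack:
--         i = stack.pop()
--         visited[i] = True
--         for j in range(len(computers)):
--             if visited[j] == False and computers[idx][j] == 1:
--                 stack.append(j)
--
-- def solution(n, computers):
--     answer = 0
--     visited = [False for _ in range(n)]
--     while False in visited:
--         for i in range(n):
--             if visited[i] == False:
--                 dfs(i, computers, visited)
--                 answer += 1
--     return answer
-- ===== SOURCE B (Python) =====
-- def solution(n, computers):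
--     # Greedy single pass: each uncovered node starts a new group and covers
--     # itself plus the neighbours listed in its row.
--     covered = set()
--     answer = 0
--     for i in range(n):
--         if i not in covered:
--             answer += 1
--             covered.add(i)
--             covered.update(j for j, c in enumerate(computers[i]) if c == 1)
--     return answer
-- ===== Notes on version B (the rewrite author's own statement) =====
-- stated objective: simpler
-- what changed: Replaced the while-loop + stack pseudo-DFS (which rescans visited and pushes duplicate nodes, but only ever reads the starting node's row) by one left-to-right greedy pass keeping a set of covered nodes; Pre_ restricts to a proper n-by-(at-least-n) adjacency matrix (or n<=0), excluding malformed non-square inputs -- a corner no caller specifies, where A raises IndexError or counts with its truncated column scan while B raises on a missing row or covers via the full row -- plus, conservatively, square inputs with a short row on which A can still return and B returns the same value.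
-- outside the precondition, e.g. on solution(2, []): A returns 2, B raises IndexError; on solution(3, [[1, 1, 1]]): A returns 3, B returns 1; on solution(2, [[1, 1], [0]]): A returns 1, B returns 1
import Mathlib
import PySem

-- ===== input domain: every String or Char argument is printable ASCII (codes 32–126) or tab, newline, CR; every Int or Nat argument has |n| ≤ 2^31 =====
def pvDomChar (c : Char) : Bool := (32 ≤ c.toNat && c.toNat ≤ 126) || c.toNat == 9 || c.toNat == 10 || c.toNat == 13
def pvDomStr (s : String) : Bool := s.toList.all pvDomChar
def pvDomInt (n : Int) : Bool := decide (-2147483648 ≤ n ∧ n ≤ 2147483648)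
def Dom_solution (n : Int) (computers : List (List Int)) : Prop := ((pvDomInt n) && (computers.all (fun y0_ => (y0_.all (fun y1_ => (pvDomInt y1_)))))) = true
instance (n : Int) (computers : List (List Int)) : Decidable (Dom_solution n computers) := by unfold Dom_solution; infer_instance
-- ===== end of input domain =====

-- B replaces A's while-loop + stack pseudo-DFS (it only ever reads the starting
-- node's row) by one greedy pass with a covered-set: simpler, same values on Pre_.

-- ===== PORT A =====
-- computers[idx][j]; total stand-in, Pre_ keeps every access of the Python in range
def pvMat (computers : List (List Int)) (idx j : Int) : Int :=
  PySem.List.pyGetD ((PySem.List.pyGet? computers idx).getD []) j 0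

-- the 'while stack:' loop of dfs; stack head = Python's top (list end); fuel only
-- makes the loop total, (len+2)^2 is proved sufficient below
def dfsLoop (fuel : Nat) (computers : List (List Int)) (idx : Int)
    (visited : List Bool) (stack : List Int) : List Bool :=
  match fuel, stack with
  | _, [] => visited
  | 0, _ :: _ => visited
  | f + 1, i :: rest =>
    let visited' := PySem.List.pySetD visited i true          -- visited[i] = True
    let pushed := (PySem.List.pyRange 0 (PySem.List.len computers) 1).filter
      (fun j => (PySem.List.pyGetD visited' j true == false) && (pvMat computers idx j == 1))
    dfsLoop f computers idx visited' (pushed.reverse ++ rest)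

def dfsA (idx : Int) (computers : List (List Int)) (visited : List Bool) : List Bool :=
  dfsLoop ((computers.length + 2) * (computers.length + 2)) computers idx visited [idx]

-- body of 'for i in range(n): if visited[i] == False: dfs(i); answer += 1'
def forPass (n : Int) (computers : List (List Int)) (st : List Bool × Int) : List Bool × Int :=
  (PySem.List.pyRange 0 n 1).foldl
    (fun st i => if PySem.List.pyGetD st.1 i true == false
                 then (dfsA i computers st.1, st.2 + 1) else st) st

-- 'while False in visited:'; fuel n+1 only makes it total
def whileLoop (fuel : Nat) (n : Int) (computers : List (List Int))
    (visited : List Bool) (answer : Int) : Int :=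
  match fuel with
  | 0 => answer
  | f + 1 =>
    if false ∈ visited then
      let st := forPass n computers (visited, answer)
      whileLoop f n computers st.1 st.2
    else answer

def solution (n : Int) (computers : List (List Int)) : Int :=
  whileLoop (n.toNat + 1) n computers (List.replicate n.toNat false) 0

-- ===== PORT B =====
-- one greedy pass; 'covered.update(j for j, c in enumerate(computers[i]) if c == 1)'
def solution_alt (n : Int) (computers : List (List Int)) : Int :=
  ((PySem.List.pyRange 0 n 1).foldl
    (fun st i =>
      if PySem.Set.contains st.1 i then st
      else
        ((PySem.List.enumerate ((PySem.List.pyGet? computers i).getD []) 0).foldl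
            (fun s jc => if jc.2 == 1 then PySem.Set.add s jc.1 else s)
            (PySem.Set.add st.1 i), st.2 + 1))
    ((PySem.Set.empty : PySem.Set Int), 0)).2

-- ===== PRECONDITION & SPEC =====
-- Pre_ restricts to a proper adjacency matrix (n rows of length ≥ n) or n ≤ 0.  It excludes
-- malformed non-square inputs, a corner no caller specifies and on which either behaviour is
-- defensible: A raises IndexError or counts with its truncated column scan (only the first
-- len(computers) columns), while the natural B raises IndexError on a missing row or covers
-- via the full row; and, conservatively, square inputs with a short row on which A happens
-- to return — there B returns the same value.
def Pre_solution (n : Int) (computers : List (List Int)) : Prop :=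
  n ≤ 0 ∨ (n = (computers.length : Int) ∧ ∀ row ∈ computers, n ≤ (row.length : Int))
instance (n : Int) (computers : List (List Int)) : Decidable (Pre_solution n computers) := by
  unfold Pre_solution; infer_instance
def pvWitness_solution : Int × List (List Int) := (2, [[0, 1], [1, 0]])

def Spec_solution (n : Int) (computers : List (List Int)) (out : Int) : Prop := out = solution_alt n computers
instance (n : Int) (computers : List (List Int)) (out : Int) : Decidable (Spec_solution n computers out) := by unfold Spec_solution; infer_instance

-- ===== CLAIM (what is proved, stated in full; the proofs are below) =====
def Claim_equal_solution : Prop := ∀ (n : Int) (computers : List (List Int)), Dom_solution n computers → Pre_solution n computers → Spec_solution n computers (solution n computers)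

-- ===== LEMMAS AND PROOFS =====

-- proof-only abbreviations
def gV (v : List Bool) (j : Int) : Bool := PySem.List.pyGetD v j true
def SB (computers : List (List Int)) (idx j : Int) : Bool := pvMat computers idx j == 1
def markS (computers : List (List Int)) (idx : Int) (v : List Bool) : List Bool :=
  v.mapIdx (fun j b => b || (decide (j < computers.length) && SB computers idx (j : Int)))
def markT (computers : List (List Int)) (idx : Int) (v : List Bool) : List Bool :=
  v.mapIdx (fun j b => b || decide ((j : Int) = idx) || (decide (j < computers.length) && SB computers idx (j : Int)))
def uCnt (computers : List (List Int)) (idx : Int) (v : List Bool) : Nat :=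
  (List.range computers.length).countP (fun j : Nat => SB computers idx (j : Int) && !(gV v (j : Int)))

theorem countP_flip {α : Type} (p q : α → Bool) :
    ∀ (l : List α), l.Nodup → ∀ a ∈ l, p a = true → q a = false →
    (∀ x ∈ l, x ≠ a → p x = q x) → l.countP p = l.countP q + 1 := by
  intro l hnd a ha hp hq hagree
  induction l with
  | nil => simp at ha
  | cons x xs ih =>
    simp only [List.countP_cons]
    rcases List.mem_cons.1 ha with rfl | hmem
    · have hx : ∀ y ∈ xs, p y = true ↔ q y = true := by
        intro y hy
        rw [hagree y (List.mem_cons_of_mem _ hy) (fun h => (List.nodup_cons.1 hnd).1 (h ▸ hy))]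
      rw [List.countP_congr hx, hp, hq]; simp
    · have hxa : x ≠ a := fun h => (List.nodup_cons.1 hnd).1 (h ▸ hmem)
      rw [hagree x (List.mem_cons_self) hxa,
        ih (List.nodup_cons.1 hnd).2 hmem (fun y hy hne => hagree y (List.mem_cons_of_mem _ hy) hne)]
      omega

theorem gV_set (v : List Bool) (i j : Int) (hi0 : 0 ≤ i) (hi : i.toNat < v.length) (hj0 : 0 ≤ j) :
    gV (PySem.List.pySetD v i true) j = if j = i then true else gV v j := by
  have hi' : i = ((i.toNat : Nat) : Int) := (Int.toNat_of_nonneg hi0).symm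
  have hj' : j = ((j.toNat : Nat) : Int) := (Int.toNat_of_nonneg hj0).symm
  rw [hi', hj', gV, gV, PySem.List.pySetD_natCast, PySem.List.pyGetD_natCast,
    PySem.List.pyGetD_natCast]
  simp only [List.getD, List.getElem?_set]
  by_cases h : j.toNat = i.toNat
  · have : ((j.toNat : Int)) = (i.toNat : Int) := by exact_mod_cast h
    simp [h, hi]
  · have h1 : ¬ (i.toNat = j.toNat) := fun hh => h hh.symm
    have h2 : ¬ (((j.toNat : Int)) = (i.toNat : Int)) := by exact_mod_cast h
    rw [if_neg h1, if_neg h2]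

theorem markS_set (computers : List (List Int)) (idx i : Int) (v : List Bool)
    (hi0 : 0 ≤ i) (hitn : i.toNat < v.length) (him : i.toNat < computers.length)
    (hS : SB computers idx i = true) :
    markS computers idx (PySem.List.pySetD v i true) = markS computers idx v := by
  have hi' : i = ((i.toNat : Nat) : Int) := (Int.toNat_of_nonneg hi0).symm
  rw [hi', PySem.List.pySetD_natCast]
  apply List.ext_getElem
  · simp [markS]
  · intro k h1 h2
    simp only [markS, List.getElem_mapIdx, List.getElem_set]
    by_cases h : i.toNat = k
    · subst h
      rw [← hi'] at *
      simp [hS, him]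
    · simp [h]

theorem markS_eq_self (computers : List (List Int)) (idx : Int) (v : List Bool)
    (h : ∀ j : Nat, j < v.length → j < computers.length →
      SB computers idx (j : Int) = true → gV v (j : Int) = true) :
    markS computers idx v = v := by
  apply List.ext_getElem
  · simp [markS]
  · intro k h1 h2
    simp only [markS, List.getElem_mapIdx]
    by_cases hm : k < computers.length
    · by_cases hS : SB computers idx (k : Int) = true
      · have := h k h2 hm hS
        rw [gV, PySem.List.pyGetD_natCast] at this
        simp [List.getD, List.getElem?_eq_getElem h2] at this
        simp [this]
      · simp at hS
        simp [hS]
    · simp [hm]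

theorem dfsLoop_spec (computers : List (List Int)) (idx : Int) :
    ∀ (fuel : Nat) (v : List Bool) (stack : List Int),
    computers.length ≤ v.length →
    (∀ i ∈ stack, 0 ≤ i ∧ i < (computers.length : Int) ∧ SB computers idx i = true) →
    (∀ j : Nat, j < computers.length → SB computers idx (j : Int) = true →
        gV v (j : Int) = false → (j : Int) ∈ stack) →
    (∀ i rest, stack = i :: rest → gV v i = true →
        ∀ j : Nat, j < computers.length → SB computers idx (j : Int) = true → gV v (j : Int) = true) →
    (computers.length + 2) * uCnt computers idx v + stack.length ≤ fuel →
    dfsLoop fuel computers idx v stack = markS computers idx v := by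
  intro fuel
  induction fuel with
  | zero =>
    intro v stack hlen hstack hcover hJ hfuel
    cases stack with
    | nil =>
      show v = markS computers idx v
      refine (markS_eq_self computers idx v ?_).symm
      intro j hjv hjm hS
      rcases (Bool.eq_false_or_eq_true (gV v (j : Int))).symm with hf | ht
      · exact absurd (hcover j hjm hS hf) (List.not_mem_nil)
      · exact ht
    | cons i rest => simp at hfuel
  | succ f ih =>
    intro v stack hlen hstack hcover hJ hfuel
    cases stack with
    | nil =>
      show v = markS computers idx v
      refine (markS_eq_self computers idx v ?_).symm
      intro j hjv hjm hS
      rcases (Bool.eq_false_or_eq_true (gV v (j : Int))).symm with hf | ht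
      · exact absurd (hcover j hjm hS hf) (List.not_mem_nil)
      · exact ht
    | cons i rest =>
      obtain ⟨hi0, him, hiS⟩ := hstack i List.mem_cons_self
      set m := computers.length with hm
      have him' : i.toNat < m := by omega
      have hitn : i.toNat < v.length := by omega
      set v' := PySem.List.pySetD v i true with hv'
      have hlen' : m ≤ v'.length := by
        rw [hv', PySem.List.pySetD_of_nonneg v true hi0, List.length_set]
        exact hlen
      have hgv' : ∀ j : Int, 0 ≤ j → gV v' j = if j = i then true else gV v j :=
        fun j hj0 => gV_set v i j hi0 hitn hj0
      set pushed := (PySem.List.pyRange 0 (PySem.List.len computers) 1).filter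
        (fun j => (PySem.List.pyGetD v' j true == false) && (pvMat computers idx j == 1)) with hp
      have hred : dfsLoop (f + 1) computers idx v (i :: rest)
          = dfsLoop f computers idx v' (pushed.reverse ++ rest) := rfl
      have hmemp : ∀ x : Int, x ∈ pushed ↔ (0 ≤ x ∧ x < (m : Int) ∧ gV v' x = false ∧ SB computers idx x = true) := by
        intro x
        rw [hp, List.mem_filter, PySem.List.len_eq, PySem.List.mem_pyRange_one]
        constructor
        · rintro ⟨⟨h1, h2⟩, h3⟩
          simp only [Bool.and_eq_true, beq_iff_eq] at h3
          exact ⟨h1, h2, h3.1, by simpa [SB] using h3.2⟩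
        · rintro ⟨h1, h2, h3, h4⟩
          refine ⟨⟨h1, h2⟩, ?_⟩
          simp only [Bool.and_eq_true, beq_iff_eq]
          exact ⟨h3, by simpa [SB] using h4⟩
      have hplen : pushed.length = uCnt computers idx v' := by
        have h1 : pushed.length = (List.range m).countP
            (fun k : Nat => (PySem.List.pyGetD v' ((k : Nat) : Int) true == false) && (pvMat computers idx ((k : Nat) : Int) == 1)) := by
          rw [hp, PySem.List.len_eq, PySem.List.pyRange_zero_nat, List.filter_map,
            List.length_map, List.countP_eq_length_filter]
          rfl
        rw [h1, uCnt]
        apply List.countP_congr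
        intro x hx
        simp only [gV, SB]
        cases PySem.List.pyGetD v' (x : Int) true <;> simp [Bool.and_comm]
      have hub : uCnt computers idx v' ≤ m := by
        rw [uCnt]
        calc (List.range computers.length).countP
              (fun j : Nat => SB computers idx (j : Int) && !(gV v' (j : Int)))
            ≤ (List.range computers.length).length := List.countP_le_length
          _ = m := by rw [List.length_range]
      rw [hred]
      rcases (Bool.eq_false_or_eq_true (gV v i)).symm with hvi | hvi
      · -- unvisited pop
        have hflip : uCnt computers idx v = uCnt computers idx v' + 1 := by
          simp only [uCnt]
          apply countP_flip _ _ (List.range m) (List.nodup_range) i.toNat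
            (List.mem_range.2 (by omega))
          · simp only [Bool.and_eq_true, Bool.not_eq_eq_eq_not, Bool.not_true]
            rw [Int.toNat_of_nonneg hi0]
            exact ⟨hiS, hvi⟩
          · rw [Int.toNat_of_nonneg hi0, hgv' i hi0, if_pos rfl]
            simp
          · intro x hx hne
            have hxi : ¬ ((x : Int) = i) := by
              rw [← Int.toNat_of_nonneg hi0]
              exact_mod_cast hne
            rw [hgv' x (by positivity), if_neg hxi]
        have hres : markS computers idx v' = markS computers idx v :=
          markS_set computers idx i v hi0 hitn him' hiS
        rw [← hres]
        apply ih
        · exact hlen'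
        · intro x hxmem
          rcases List.mem_append.1 hxmem with hx | hx
          · obtain ⟨a, b, _, c⟩ := (hmemp x).1 (List.mem_reverse.1 hx)
            exact ⟨a, b, c⟩
          · exact hstack x (List.mem_cons_of_mem _ hx)
        · intro j hj hS hf
          refine List.mem_append.2 (Or.inl (List.mem_reverse.2 ((hmemp _).2 ?_)))
          exact ⟨by positivity, by exact_mod_cast hj, hf, hS⟩
        · intro i' rest' heq hvis j hj hS
          rcases hpe : pushed with _ | ⟨y, ys⟩
          · have hnone : ∀ x ∈ PySem.List.pyRange 0 (PySem.List.len computers) 1,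
                ¬ ((PySem.List.pyGetD v' x true == false) && (pvMat computers idx x == 1)) := by
              intro x hx hcontra
              have : x ∈ pushed := by rw [hp]; exact List.mem_filter.2 ⟨hx, by simpa using hcontra⟩
              rw [hpe] at this; exact List.not_mem_nil this
            rcases (Bool.eq_false_or_eq_true (gV v' (j : Int))).symm with hf2 | ht2
            · exfalso
              have hjmem : (j : Int) ∈ PySem.List.pyRange 0 (PySem.List.len computers) 1 := by
                rw [PySem.List.len_eq, PySem.List.mem_pyRange_one]
                exact ⟨by positivity, by exact_mod_cast hj⟩
              apply hnone _ hjmem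
              simp only [Bool.and_eq_true, beq_iff_eq]
              exact ⟨by simpa [gV] using hf2, by simpa [SB] using hS⟩
            · exact ht2
          · exfalso
            have hy : i' ∈ pushed := by
              have hne : pushed.reverse ≠ [] := by simp [hpe]
              rcases hrev : pushed.reverse with _ | ⟨z, zs⟩
              · exact absurd hrev hne
              · rw [hrev, List.cons_append] at heq
                injection heq with h1 h2
                have hz : z ∈ pushed.reverse := by rw [hrev]; exact List.mem_cons_self
                rw [← h1]
                exact List.mem_reverse.1 hz
            obtain ⟨_, _, hfz, _⟩ := (hmemp i').1 hy
            rw [hvis] at hfz; exact absurd hfz (by decide)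
        · rw [List.length_append, List.length_reverse, hplen]
          have : (m + 2) * uCnt computers idx v + (i :: rest).length ≤ f + 1 := hfuel
          simp only [List.length_cons] at this
          rw [hflip] at this
          nlinarith [hub]
      · -- already-visited pop: all reachable nodes are visited
        have hAll := hJ i rest rfl hvi
        have hall' : ∀ j : Nat, j < m → SB computers idx (j : Int) = true → gV v' (j : Int) = true := by
          intro j hj hS
          rw [hgv' j (by positivity)]
          split
          · rfl
          · exact hAll j hj hS
        have hpe : pushed = [] := by
          rw [hp]
          apply List.filter_eq_nil_iff.2
          intro x hx
          rw [PySem.List.len_eq, PySem.List.mem_pyRange_one] at hx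
          intro hcontra
          simp only [Bool.and_eq_true, beq_iff_eq] at hcontra
          have hSx : SB computers idx x = true := by simpa [SB] using hcontra.2
          have : gV v' x = true := by
            have hx' : x = ((x.toNat : Nat) : Int) := (Int.toNat_of_nonneg hx.1).symm
            rw [hx']
            exact hall' x.toNat (by omega) (by rw [← hx']; exact hSx)
          rw [gV] at this; rw [this] at hcontra; exact absurd hcontra.1 (by decide)
        have hu0 : uCnt computers idx v' = 0 := by
          rw [uCnt, List.countP_eq_length_filter, List.filter_eq_nil_iff.2, List.length_nil]
          intro j hj
          simp only [Bool.and_eq_true, Bool.not_eq_eq_eq_not, Bool.not_true, not_and]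
          intro hS
          rw [hall' j (List.mem_range.1 hj) hS]
          simp
        have hres : markS computers idx v' = markS computers idx v :=
          markS_set computers idx i v hi0 hitn him' hiS
        rw [hpe, List.reverse_nil, List.nil_append, ← hres]
        apply ih
        · exact hlen'
        · intro x hx; exact hstack x (List.mem_cons_of_mem _ hx)
        · intro j hj hS hf
          rw [hall' j hj hS] at hf; exact absurd hf (by decide)
        · intro i' rest' heq hvis j hj hS; exact hall' j hj hS
        · rw [hu0]
          have : (m + 2) * uCnt computers idx v + (i :: rest).length ≤ f + 1 := hfuel
          simp only [List.length_cons] at this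
          omega

theorem pushedMem (computers : List (List Int)) (idx : Int) (v' : List Bool) (x : Int) :
    x ∈ (PySem.List.pyRange 0 (PySem.List.len computers) 1).filter
      (fun j => (PySem.List.pyGetD v' j true == false) && (pvMat computers idx j == 1)) ↔
    (0 ≤ x ∧ x < (computers.length : Int) ∧ gV v' x = false ∧ SB computers idx x = true) := by
  rw [List.mem_filter, PySem.List.len_eq, PySem.List.mem_pyRange_one]
  constructor
  · rintro ⟨⟨h1, h2⟩, h3⟩
    simp only [Bool.and_eq_true, beq_iff_eq] at h3
    exact ⟨h1, h2, h3.1, by simpa [SB] using h3.2⟩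
  · rintro ⟨h1, h2, h3, h4⟩
    refine ⟨⟨h1, h2⟩, ?_⟩
    simp only [Bool.and_eq_true, beq_iff_eq]
    exact ⟨h3, by simpa [SB] using h4⟩

theorem pushedLen (computers : List (List Int)) (idx : Int) (v' : List Bool) :
    ((PySem.List.pyRange 0 (PySem.List.len computers) 1).filter
      (fun j => (PySem.List.pyGetD v' j true == false) && (pvMat computers idx j == 1))).length
    = uCnt computers idx v' := by
  have h1 : ((PySem.List.pyRange 0 (PySem.List.len computers) 1).filter
      (fun j => (PySem.List.pyGetD v' j true == false) && (pvMat computers idx j == 1))).length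
      = (List.range computers.length).countP
        (fun k : Nat => (PySem.List.pyGetD v' ((k : Nat) : Int) true == false) && (pvMat computers idx ((k : Nat) : Int) == 1)) := by
    rw [PySem.List.len_eq, PySem.List.pyRange_zero_nat, List.filter_map,
      List.length_map, List.countP_eq_length_filter]
    rfl
  rw [h1, uCnt]
  apply List.countP_congr
  intro x hx
  simp only [gV, SB]
  cases PySem.List.pyGetD v' (x : Int) true <;> simp [Bool.and_comm]

theorem markT_eq (computers : List (List Int)) (idx : Int) (v : List Bool)
    (hi0 : 0 ≤ idx) (hitn : idx.toNat < v.length) :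
    markS computers idx (PySem.List.pySetD v idx true) = markT computers idx v := by
  rw [PySem.List.pySetD_of_nonneg v true hi0]
  apply List.ext_getElem
  · simp [markS, markT]
  · intro k h1 h2
    simp only [markS, markT, List.getElem_mapIdx, List.getElem_set]
    by_cases h : idx.toNat = k
    · have : ((k : Nat) : Int) = idx := by omega
      simp [h, this]
    · have : ¬ (((k : Nat) : Int) = idx) := by omega
      simp [h, this]

theorem dfsA_spec (computers : List (List Int)) (idx : Int) (v : List Bool)
    (hlen : computers.length ≤ v.length) (h0 : 0 ≤ idx) (hidx : idx < (v.length : Int)) :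
    dfsA idx computers v = markT computers idx v := by
  set m := computers.length with hm
  have hitn : idx.toNat < v.length := by omega
  obtain ⟨f, hf⟩ : ∃ f, (m + 2) * (m + 2) = f + 1 :=
    ⟨(m + 2) * (m + 2) - 1, by have h4 : 0 < (m + 2) * (m + 2) := Nat.mul_pos (by omega) (by omega); omega⟩
  have hred : dfsA idx computers v
      = dfsLoop f computers idx (PySem.List.pySetD v idx true)
        (((PySem.List.pyRange 0 (PySem.List.len computers) 1).filter
          (fun j => (PySem.List.pyGetD (PySem.List.pySetD v idx true) j true == false)
            && (pvMat computers idx j == 1))).reverse ++ []) := by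
    rw [dfsA, ← hm, hf]
    rfl
  set v' := PySem.List.pySetD v idx true with hv'
  set pushed := (PySem.List.pyRange 0 (PySem.List.len computers) 1).filter
      (fun j => (PySem.List.pyGetD v' j true == false) && (pvMat computers idx j == 1)) with hp
  have hlen' : m ≤ v'.length := by
    rw [hv', PySem.List.pySetD_of_nonneg v true h0, List.length_set]
    exact hlen
  have hub : uCnt computers idx v' ≤ m := by
    rw [uCnt]
    calc (List.range computers.length).countP
          (fun j : Nat => SB computers idx (j : Int) && !(gV v' (j : Int)))
        ≤ (List.range computers.length).length := List.countP_le_length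
      _ = m := by rw [List.length_range]
  rw [hred, ← markT_eq computers idx v h0 hitn, ← hv']
  apply dfsLoop_spec
  · exact hlen'
  · intro x hxmem
    rw [List.append_nil, List.mem_reverse] at hxmem
    obtain ⟨a, b, _, c⟩ := (pushedMem computers idx v' x).1 hxmem
    exact ⟨a, b, c⟩
  · intro j hj hS hfj
    rw [List.append_nil, List.mem_reverse]
    exact (pushedMem computers idx v' (j : Int)).2 ⟨by positivity, by exact_mod_cast hj, hfj, hS⟩
  · intro i' rest' heq hvis j hj hS
    rw [List.append_nil] at heq
    rcases hpe : pushed with _ | ⟨z, zs⟩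
    · rcases (Bool.eq_false_or_eq_true (gV v' (j : Int))).symm with hf2 | ht2
      · exfalso
        have : (j : Int) ∈ pushed :=
          (pushedMem computers idx v' (j : Int)).2 ⟨by positivity, by exact_mod_cast hj, hf2, hS⟩
        rw [hpe] at this
        exact List.not_mem_nil this
      · exact ht2
    · exfalso
      have hy : i' ∈ pushed := by
        have hz : pushed.reverse ≠ [] := by simp [hpe]
        rcases hrev : pushed.reverse with _ | ⟨y, ys⟩
        · exact absurd hrev hz
        · rw [hrev] at heq
          injection heq with h1 h2
          have hym : y ∈ pushed.reverse := by rw [hrev]; exact List.mem_cons_self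
          rw [← h1]
          exact List.mem_reverse.1 hym
      obtain ⟨_, _, hfz, _⟩ := (pushedMem computers idx v' i').1 hy
      rw [hvis] at hfz
      exact absurd hfz (by decide)
  · rw [List.append_nil, List.length_reverse, hp, pushedLen]
    have h3 : (m + 2) * (m + 2) = (m + 2) * m + 2 * m + 4 := by ring
    have h2 : (m + 2) * uCnt computers idx v' ≤ (m + 2) * m := Nat.mul_le_mul_left _ hub
    show (m + 2) * uCnt computers idx v' + uCnt computers idx v' ≤ f
    omega

theorem gV_eq_getElem (v : List Bool) (k : Nat) (h : k < v.length) : gV v (k : Int) = v[k] := by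
  rw [gV, PySem.List.pyGetD_natCast]
  simp [List.getD, List.getElem?_eq_getElem h]

theorem length_markT (computers : List (List Int)) (idx : Int) (v : List Bool) :
    (markT computers idx v).length = v.length := by simp [markT]

theorem gV_markT (computers : List (List Int)) (idx : Int) (v : List Bool) (j : Nat)
    (hj : j < v.length) :
    gV (markT computers idx v) (j : Int)
      = (gV v (j : Int) || decide ((j : Int) = idx)
          || (decide (j < computers.length) && SB computers idx (j : Int))) := by
  rw [gV_eq_getElem _ _ (by rw [length_markT]; exact hj), gV_eq_getElem _ _ hj]
  simp [markT]

theorem mem_foldl_add (l : List (Int × Int)) (s0 : PySem.Set Int) (x : Int) :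
    (x ∈ l.foldl (fun s jc => if jc.2 == 1 then PySem.Set.add s jc.1 else s) s0
      ↔ x ∈ s0 ∨ ∃ p ∈ l, p.2 = 1 ∧ p.1 = x) := by
  induction l generalizing s0 with
  | nil => simp
  | cons p ps ih =>
    simp only [List.foldl_cons]
    by_cases hp : p.2 = 1
    · rw [if_pos (by simpa using hp), ih, PySem.Set.mem_add]
      constructor
      · rintro (⟨h | h⟩ | h)
        · exact Or.inl h
        · exact Or.inr ⟨p, List.mem_cons_self, hp, h.symm⟩
        · obtain ⟨q, hq, h1, h2⟩ := h
          exact Or.inr ⟨q, List.mem_cons_of_mem _ hq, h1, h2⟩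
      · rintro (h | ⟨q, hq, h1, h2⟩)
        · exact Or.inl (Or.inl h)
        · rcases List.mem_cons.1 hq with rfl | hq'
          · exact Or.inl (Or.inr h2.symm)
          · exact Or.inr ⟨q, hq', h1, h2⟩
    · rw [if_neg (by simpa using hp), ih]
      constructor
      · rintro (h | ⟨q, hq, h1, h2⟩)
        · exact Or.inl h
        · exact Or.inr ⟨q, List.mem_cons_of_mem _ hq, h1, h2⟩
      · rintro (h | ⟨q, hq, h1, h2⟩)
        · exact Or.inl h
        · rcases List.mem_cons.1 hq with rfl | hq'
          · exact absurd h1 hp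
          · exact Or.inr ⟨q, hq', h1, h2⟩

theorem pvMat_getD (computers : List (List Int)) (i : Int) (k : Nat) :
    pvMat computers i (k : Int) = ((PySem.List.pyGet? computers i).getD []).getD k 0 := by
  rw [pvMat, PySem.List.pyGetD_natCast]

theorem pass_equiv (computers : List (List Int)) (N : Nat) (hmN : computers.length = N)
    (hrows : ∀ row ∈ computers, N ≤ row.length) :
    ∀ (l : List Int), (∀ i ∈ l, 0 ≤ i ∧ i < (N : Int)) →
    ∀ (v : List Bool) (cov : PySem.Set Int) (a : Int),
    v.length = N →
    (∀ j : Nat, j < N → (gV v (j : Int) = true ↔ (j : Int) ∈ cov)) →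
    (l.foldl (fun st i => if PySem.List.pyGetD st.1 i true == false
        then (dfsA i computers st.1, st.2 + 1) else st) (v, a)).2
      = (l.foldl (fun st i =>
          if PySem.Set.contains st.1 i then st
          else
            ((PySem.List.enumerate ((PySem.List.pyGet? computers i).getD []) 0).foldl
                (fun s jc => if jc.2 == 1 then PySem.Set.add s jc.1 else s)
                (PySem.Set.add st.1 i), st.2 + 1)) (cov, a)).2 := by
  intro l
  induction l with
  | nil => intro _ v cov a _ _; rfl
  | cons i t ih =>
    intro hb v cov a hlen hinv
    obtain ⟨hi0, hiN⟩ := hb i List.mem_cons_self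
    have hitn : i.toNat < N := by omega
    have hi' : i = ((i.toNat : Nat) : Int) := (Int.toNat_of_nonneg hi0).symm
    have hguard : (gV v i = true) ↔ (PySem.Set.contains cov i = true) := by
      rw [PySem.Set.contains_iff, hi']
      exact hinv i.toNat hitn
    simp only [List.foldl_cons]
    rcases (Bool.eq_false_or_eq_true (gV v i)).symm with hvi | hvi
    · -- uncovered node: both branches fire
      have hga : (PySem.List.pyGetD v i true == false) = true := by
        rw [show PySem.List.pyGetD v i true = gV v i from rfl, hvi]; rfl
      have hgb : PySem.Set.contains cov i = false := by
        rcases Bool.eq_false_or_eq_true (PySem.Set.contains cov i) with h | h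
        · rw [← hguard] at h; rw [h] at hvi; exact absurd hvi (by decide)
        · exact h
      rw [if_pos hga, if_neg (by rw [hgb]; exact Bool.false_ne_true)]
      rw [dfsA_spec computers i v (by omega) hi0 (by rw [hlen]; exact_mod_cast hiN)]
      apply ih (fun x hx => hb x (List.mem_cons_of_mem _ hx))
      · rw [length_markT, hlen]
      · intro j hj
        set row := (PySem.List.pyGet? computers i).getD [] with hrow
        have hget : PySem.List.pyGet? computers i = some computers[i.toNat] :=
          PySem.List.pyGet?_eq_some_getElem computers hi0 (by rw [hmN]; exact_mod_cast hiN)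
        have hrmem : row ∈ computers := by
          rw [hrow, hget]
          exact List.getElem_mem _
        have hrlen : N ≤ row.length := hrows row hrmem
        have hjlen : j < computers.length := by omega
        have hjr : j < row.length := by omega
        have hSBj : SB computers i (j : Int) = (row[j] == 1) := by
          rw [SB, pvMat_getD, ← hrow, List.getD_eq_getElem row 0 hjr]
        rw [gV_markT computers i v j (by omega), mem_foldl_add, PySem.Set.mem_add]
        constructor
        · intro h
          rcases Bool.or_eq_true_iff.1 h with h | h
          · rcases Bool.or_eq_true_iff.1 h with h | h
            · exact Or.inl (Or.inl ((hinv j hj).1 h))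
            · exact Or.inl (Or.inr (of_decide_eq_true h))
          · have hS : SB computers i (j : Int) = true := (Bool.and_eq_true_iff.1 h).2
            have h1 : row[j] = 1 := by
              rw [hSBj, beq_iff_eq] at hS; exact hS
            refine Or.inr ⟨((j : Int), row[j]), ?_, ?_, rfl⟩
            · rw [PySem.List.mem_enumerate_iff]
              exact ⟨j, hjr, by simp⟩
            · exact h1
        · intro h
          rcases h with (h | h) | ⟨p, hp, h1, h2⟩
          · exact Bool.or_eq_true_iff.2 (Or.inl (Bool.or_eq_true_iff.2 (Or.inl ((hinv j hj).2 h))))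
          · exact Bool.or_eq_true_iff.2 (Or.inl (Bool.or_eq_true_iff.2 (Or.inr (decide_eq_true h))))
          · rw [PySem.List.mem_enumerate_iff] at hp
            obtain ⟨k, hk, rfl⟩ := hp
            simp only [zero_add] at h1 h2
            have hkj : k = j := by omega
            subst hkj
            refine Bool.or_eq_true_iff.2 (Or.inr ?_)
            rw [Bool.and_eq_true_iff]
            refine ⟨decide_eq_true hjlen, ?_⟩
            rw [hSBj, beq_iff_eq]
            exact h1
    · -- already covered: both skip
      have hga : (PySem.List.pyGetD v i true == false) = false := by
        rw [show PySem.List.pyGetD v i true = gV v i from rfl, hvi]; rfl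
      rw [if_neg (by rw [hga]; exact Bool.false_ne_true), if_pos (hguard.1 hvi)]
      exact ih (fun x hx => hb x (List.mem_cons_of_mem _ hx)) v cov a hlen hinv

theorem pass_marks (computers : List (List Int)) (N : Nat) (hmN : computers.length ≤ N) :
    ∀ (l : List Int), (∀ i ∈ l, 0 ≤ i ∧ i < (N : Int)) →
    ∀ (v : List Bool) (a : Int), v.length = N →
    ((l.foldl (fun st i => if PySem.List.pyGetD st.1 i true == false
        then (dfsA i computers st.1, st.2 + 1) else st) (v, a)).1.length = N ∧
     ∀ j : Nat, j < N → ((j : Int) ∈ l ∨ gV v (j : Int) = true) →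
       gV ((l.foldl (fun st i => if PySem.List.pyGetD st.1 i true == false
        then (dfsA i computers st.1, st.2 + 1) else st) (v, a)).1) (j : Int) = true) := by
  intro l
  induction l with
  | nil =>
    intro _ v a hlen
    refine ⟨hlen, ?_⟩
    intro j hj hmem
    rcases hmem with h | h
    · exact absurd h List.not_mem_nil
    · exact h
  | cons i t ih =>
    intro hb v a hlen
    obtain ⟨hi0, him⟩ := hb i List.mem_cons_self
    simp only [List.foldl_cons]
    by_cases hg : (PySem.List.pyGetD v i true == false) = true
    · rw [if_pos hg]
      rw [dfsA_spec computers i v (by omega) hi0 (by rw [hlen]; exact him)]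
      obtain ⟨ihl, ihm⟩ := ih (fun x hx => hb x (List.mem_cons_of_mem _ hx))
        (markT computers i v) (a + 1) (by rw [length_markT, hlen])
      refine ⟨ihl, ?_⟩
      intro j hj hmem
      rcases hmem with h | h
      · rcases List.mem_cons.1 h with rfl | ht
        · apply ihm j hj
          refine Or.inr ?_
          rw [gV_markT computers _ v j (by omega)]
          simp
        · exact ihm j hj (Or.inl ht)
      · apply ihm j hj
        refine Or.inr ?_
        rw [gV_markT computers i v j (by omega), h]
        simp
    · rw [if_neg hg]
      have hvi : gV v i = true := by
        rcases Bool.eq_false_or_eq_true (gV v i) with h | h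
        · exact h
        · rw [show gV v i = PySem.List.pyGetD v i true from rfl] at h
          rw [h] at hg; exact absurd rfl hg
      obtain ⟨ihl, ihm⟩ := ih (fun x hx => hb x (List.mem_cons_of_mem _ hx)) v a hlen
      refine ⟨ihl, ?_⟩
      intro j hj hmem
      rcases hmem with h | h
      · rcases List.mem_cons.1 h with rfl | ht
        · exact ihm j hj (Or.inr hvi)
        · exact ihm j hj (Or.inl ht)
      · exact ihm j hj (Or.inr h)

theorem solution_eq (n : Int) (computers : List (List Int))
    (hpre : Pre_solution n computers) :
    solution n computers = solution_alt n computers := by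
  by_cases hn0 : n ≤ 0
  · have hnt : n.toNat = 0 := by omega
    rw [solution, hnt, solution_alt, PySem.List.pyRange_one_eq_nil hn0]
    rfl
  · obtain ⟨hneq, hrows0⟩ : n = (computers.length : Int) ∧ ∀ row ∈ computers, n ≤ (row.length : Int) := by
      rcases hpre with h | h
      · omega
      · exact h
    set N := n.toNat with hN
    have hn : n = (N : Int) := by omega
    have hmN : computers.length = N := by omega
    have hrows : ∀ row ∈ computers, N ≤ row.length := by
      intro row hrm
      have := hrows0 row hrm
      omega
    have hbound : ∀ i ∈ PySem.List.pyRange 0 n 1, 0 ≤ i ∧ i < (N : Int) := by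
      intro i hi
      rw [PySem.List.mem_pyRange_one] at hi
      exact ⟨hi.1, by rw [← hn]; exact hi.2⟩
    have hlen0 : (List.replicate n.toNat false).length = N := by
      rw [List.length_replicate]
    set st := (PySem.List.pyRange 0 n 1).foldl
      (fun st i => if PySem.List.pyGetD st.1 i true == false
        then (dfsA i computers st.1, st.2 + 1) else st)
      (List.replicate n.toNat false, (0 : Int)) with hst
    obtain ⟨hstl, hstm⟩ := pass_marks computers N (le_of_eq hmN) (PySem.List.pyRange 0 n 1) hbound
      (List.replicate n.toNat false) 0 hlen0
    rw [← hst] at hstl hstm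
    have hfv : ¬ (false ∈ st.1) := by
      intro hmem
      obtain ⟨k, hk, hkf⟩ := List.getElem_of_mem hmem
      have hk' : k < N := by rw [← hstl]; exact hk
      have := hstm k hk' (Or.inl (by
        rw [PySem.List.mem_pyRange_one]
        constructor
        · positivity
        · rw [hn]; exact_mod_cast hk'))
      rw [gV_eq_getElem st.1 k hk] at this
      rw [hkf] at this
      exact absurd this (by decide)
    have hguard : false ∈ List.replicate n.toNat false := by
      rw [List.mem_replicate]
      exact ⟨by omega, rfl⟩
    have h1 : solution n computers = st.2 := by
      rw [solution, whileLoop]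
      rw [if_pos hguard]
      show whileLoop n.toNat n computers st.1 st.2 = st.2
      obtain ⟨s, hs⟩ : ∃ s, n.toNat = s + 1 := ⟨n.toNat - 1, by omega⟩
      rw [hs, whileLoop, if_neg hfv]
    rw [h1, hst]
    have hinv : ∀ j : Nat, j < N →
        (gV (List.replicate n.toNat false) (j : Int) = true ↔ (j : Int) ∈ (PySem.Set.empty : PySem.Set Int)) := by
      intro j hj
      rw [gV_eq_getElem _ j (by rw [hlen0]; exact hj)]
      simp [PySem.Set.empty]
    exact pass_equiv computers N hmN hrows (PySem.List.pyRange 0 n 1) hbound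
      (List.replicate n.toNat false) PySem.Set.empty 0 hlen0 hinv

-- ===== VERDICT (by name: the statement is the Claim_ definition above) =====
theorem solution_spec : Claim_equal_solution := by
  intro n computers _ hpre
  show solution n computers = solution_alt n computers
  exact solution_eq n computers hpre
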